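-- pv_equiv track=rewrite | github.com/khritish17/Code-Forces | Mock Question/buying_shovels_1360D.py | solve
-- ===== SOURCE A (Python) =====
-- import math
--
-- def solve(n, k):
--     div = 1
--     for d in range(1, int(math.sqrt(n)) + 1):
--         if n % d == 0:
--             if 1 <= d <= k:
--                 div = max(div, d)
--             if 1 <= n//d <= k:
--                 div = max(div, n//d)
--     return str(n//div)
-- ===== SOURCE B (Python) =====
-- import math
--
-- def solve(n, k):
--     # fewest packages: n // (largest divisor of n that is <= k), via a two-phase
--     # early-return scan: smallest valid quotient q <= sqrt(n) first, else the
--     # largest small divisor d <= sqrt(n).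
--     r = int(math.sqrt(n))
--     for q in range(1, r + 1):
--         if n % q == 0 and n // q <= k:
--             return str(q)
--     for d in range(r, 0, -1):
--         if n % d == 0 and d <= k:
--             return str(n // d)
--     return str(n)
-- ===== Notes on version B (the rewrite author's own statement) =====
-- stated objective: alternative
-- what changed: A enumerates all d up to sqrt(n) accumulating a running max over both members of each divisor pair; B does a two-phase early-return scan: first the smallest valid quotient q<=sqrt(n), otherwise the largest small divisor d<=sqrt(n) scanned downward, with no accumulator.
import Mathlib
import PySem

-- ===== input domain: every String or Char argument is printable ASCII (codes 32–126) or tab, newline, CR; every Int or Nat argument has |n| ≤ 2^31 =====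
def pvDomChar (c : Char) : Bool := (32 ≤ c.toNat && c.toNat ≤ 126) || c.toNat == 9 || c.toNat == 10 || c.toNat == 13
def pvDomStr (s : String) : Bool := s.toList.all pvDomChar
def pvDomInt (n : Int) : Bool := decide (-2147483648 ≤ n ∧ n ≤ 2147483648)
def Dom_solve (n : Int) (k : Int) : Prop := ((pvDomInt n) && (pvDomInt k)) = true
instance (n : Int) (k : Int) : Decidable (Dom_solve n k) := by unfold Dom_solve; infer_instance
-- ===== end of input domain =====

-- B replaces A's single sqrt-loop, which accumulates a running max over both members of each
-- divisor pair, by a two-phase early-return scan (smallest valid quotient first, then largest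
-- small divisor); objective: alternative decomposition, same cost.

-- ===== PORT A =====
-- loop body of A's for-loop (div is the accumulator, d the loop variable)
def solveStep (n : Int) (k : Int) (div : Int) (d : Int) : Int :=
  if PySem.Int.mod n d = 0 then
    let div1 := if 1 ≤ d ∧ d ≤ k then max div d else div
    if 1 ≤ PySem.Int.floordiv n d ∧ PySem.Int.floordiv n d ≤ k then
      max div1 (PySem.Int.floordiv n d)
    else div1
  else div

-- int(math.sqrt(n)) is ported as Nat.sqrt: exact for the 0 ≤ n ≤ 2^31 admitted by Dom/Pre
-- (the double sqrt of such n is correctly rounded and far from the next integer).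
def solve (n : Int) (k : Int) : String :=
  let div : Int :=
    (PySem.List.pyRange 1 ((Nat.sqrt n.toNat : Int) + 1) 1).foldl (solveStep n k) 1
  PySem.Int.toStr (PySem.Int.floordiv n div)

-- ===== PORT B =====
def solve_alt (n : Int) (k : Int) : String :=
  let r : Int := (Nat.sqrt n.toNat : Int)
  match (PySem.List.pyRange 1 (r + 1) 1).find?
      (fun q => PySem.Int.mod n q == 0 && decide (PySem.Int.floordiv n q ≤ k)) with
  | some q => PySem.Int.toStr q
  | none =>
    match (PySem.List.pyRange r 0 (-1)).find?
        (fun d => PySem.Int.mod n d == 0 && decide (d ≤ k)) with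
    | some d => PySem.Int.toStr (PySem.Int.floordiv n d)
    | none => PySem.Int.toStr n

-- ===== PRECONDITION & SPEC =====
-- Pre_ excludes n < 0, on which A raises ValueError (math.sqrt of a negative number).
def Pre_solve (n : Int) (k : Int) : Prop := 0 ≤ n
instance (n : Int) (k : Int) : Decidable (Pre_solve n k) := by unfold Pre_solve; infer_instance
def pvWitness_solve : Int × Int := (6, 2)

def Spec_solve (n : Int) (k : Int) (out : String) : Prop := out = solve_alt n k
instance (n : Int) (k : Int) (out : String) : Decidable (Spec_solve n k out) := by unfold Spec_solve; infer_instance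

-- ===== CLAIM (what is proved, stated in full; the proofs are below) =====
def Claim_equal_solve : Prop := ∀ (n : Int) (k : Int), Dom_solve n k → Pre_solve n k → Spec_solve n k (solve n k)

-- ===== LEMMAS AND PROOFS =====

theorem divFacts (n e : Int) (hn : 1 ≤ n) (he : 1 ≤ e) (hd : e ∣ n) :
    e * (n / e) = n ∧ 1 ≤ n / e ∧ (n / e) ∣ n ∧ n / (n / e) = e := by
  obtain ⟨c, hc⟩ := hd
  have he0 : e ≠ 0 := by omega
  have h1 : n / e = c := by rw [hc, Int.mul_ediv_cancel_left _ he0]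
  have hc1 : 1 ≤ c := by nlinarith
  have hc0 : c ≠ 0 := by omega
  refine ⟨by rw [h1]; omega, by omega, ⟨e, by rw [h1, hc]; ring⟩, ?_⟩
  rw [h1, hc, Int.mul_ediv_cancel _ hc0]

theorem ascFind (p : Int → Bool) (b : Int) :
    ∀ (N : Nat) (a : Int), b - a ≤ (N : Int) →
      ∀ q, (PySem.List.pyRange a b 1).find? p = some q →
        p q = true ∧ a ≤ q ∧ q < b ∧ ∀ x, a ≤ x → x < q → p x = false := by
  intro N
  induction N with
  | zero =>
      intro a hN q hq
      rw [PySem.List.pyRange_one_eq_nil (by omega)] at hq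
      simp at hq
  | succ m ih =>
      intro a hN q hq
      by_cases hab : a < b
      · rw [PySem.List.pyRange_one_cons hab] at hq
        rw [List.find?_cons] at hq
        by_cases hpa : p a = true
        · simp [hpa] at hq
          subst hq
          exact ⟨hpa, le_refl a, hab, fun x h1 h2 => absurd h2 (by omega)⟩
        · simp [hpa] at hq
          obtain ⟨h1, h2, h3, h4⟩ := ih (a + 1) (by omega) q hq
          refine ⟨h1, by omega, h3, fun x hx1 hx2 => ?_⟩
          rcases eq_or_lt_of_le hx1 with heq | hlt
          · rw [← heq]; simpa using hpa
          · exact h4 x (by omega) hx2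
      · rw [PySem.List.pyRange_one_eq_nil (by omega)] at hq
        simp at hq

theorem descFind (p : Int → Bool) :
    ∀ (N : Nat) (r : Int), r ≤ (N : Int) →
      ∀ d, (PySem.List.pyRange r 0 (-1)).find? p = some d →
        p d = true ∧ 0 < d ∧ d ≤ r ∧ ∀ x, d < x → x ≤ r → p x = false := by
  intro N
  induction N with
  | zero =>
      intro r hN d hq
      rw [PySem.List.pyRange_neg_one_eq_nil (by omega)] at hq
      simp at hq
  | succ m ih =>
      intro r hN d hq
      by_cases hr : 0 < r
      · rw [PySem.List.pyRange_neg_one_cons hr] at hq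
        rw [List.find?_cons] at hq
        by_cases hpr : p r = true
        · simp [hpr] at hq
          subst hq
          exact ⟨hpr, hr, le_refl r, fun x h1 h2 => absurd h1 (by omega)⟩
        · simp [hpr] at hq
          obtain ⟨h1, h2, h3, h4⟩ := ih (r - 1) (by omega) d hq
          refine ⟨h1, h2, by omega, fun x hx1 hx2 => ?_⟩
          rcases eq_or_lt_of_le hx2 with heq | hlt
          · rw [heq]; simpa using hpr
          · exact h4 x hx1 (by omega)
      · rw [PySem.List.pyRange_neg_one_eq_nil (by omega)] at hq
        simp at hq

set_option maxHeartbeats 1000000 in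
theorem foldInv (n k : Int) (hn : 1 ≤ n) :
    ∀ j : Nat,
      1 ≤ (PySem.List.pyRange 1 ((j : Int) + 1) 1).foldl (solveStep n k) 1 ∧
      ((PySem.List.pyRange 1 ((j : Int) + 1) 1).foldl (solveStep n k) 1 = 1 ∨
        ((PySem.List.pyRange 1 ((j : Int) + 1) 1).foldl (solveStep n k) 1 ∣ n ∧
         (PySem.List.pyRange 1 ((j : Int) + 1) 1).foldl (solveStep n k) 1 ≤ k)) ∧
      (∀ e : Int, e ∣ n → 1 ≤ e → e ≤ k → e ≤ (j : Int) →
        e ≤ (PySem.List.pyRange 1 ((j : Int) + 1) 1).foldl (solveStep n k) 1) ∧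
      (∀ e : Int, e ∣ n → 1 ≤ e → n / e ≤ k → e ≤ (j : Int) →
        n / e ≤ (PySem.List.pyRange 1 ((j : Int) + 1) 1).foldl (solveStep n k) 1) := by
  intro j
  induction j with
  | zero =>
      rw [show ((0 : Nat) : Int) + 1 = 1 by omega, PySem.List.pyRange_one_eq_nil (by omega)]
      refine ⟨by simp, Or.inl (by simp), ?_, ?_⟩ <;>
        · intro e _ h1 _ h2; simp at h2 ⊢; omega
  | succ m ih =>
      obtain ⟨ih1, ih2, ih3, ih4⟩ := ih
      set d : Int := (m : Int) + 1 with hd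
      have hd1 : 1 ≤ d := by omega
      have hrw : PySem.List.pyRange 1 (((m + 1 : Nat) : Int) + 1) 1
          = PySem.List.pyRange 1 ((m : Int) + 1) 1 ++ [d] := by
        rw [show (((m+1 : Nat)) : Int) + 1 = ((m : Int) + 1) + 1 by push_cast; ring]
        exact PySem.List.pyRange_one_succ_right (by omega)
      set v : Int := (PySem.List.pyRange 1 ((m : Int) + 1) 1).foldl (solveStep n k) 1 with hv
      have hfold : (PySem.List.pyRange 1 (((m + 1 : Nat) : Int) + 1) 1).foldl (solveStep n k) 1
          = solveStep n k v d := by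
        rw [hrw, List.foldl_append]; rfl
      rw [hfold]
      by_cases hdvd : d ∣ n
      · have hq := divFacts n d hn hd1 hdvd
        obtain ⟨hqe, hq1, hqdvd, hqq⟩ := hq
        have hstep : solveStep n k v d =
            (if 1 ≤ n / d ∧ n / d ≤ k then
              max (if 1 ≤ d ∧ d ≤ k then max v d else v) (n / d)
            else (if 1 ≤ d ∧ d ≤ k then max v d else v)) := by
          simp only [solveStep, PySem.Int.mod_eq_zero_iff_dvd, hdvd, if_true,
            PySem.Int.floordiv_eq_ediv_of_pos (show (0:Int) < d by omega)]
        rw [hstep]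
        have hmono : v ≤ (if 1 ≤ n / d ∧ n / d ≤ k then
              max (if 1 ≤ d ∧ d ≤ k then max v d else v) (n / d)
            else (if 1 ≤ d ∧ d ≤ k then max v d else v)) := by
          split_ifs <;> simp
        refine ⟨by omega, ?_, ?_, ?_⟩
        · -- value clause
          split_ifs with h1 h2 h2
          · rcases max_choice (max v d) (n / d) with h | h <;> rw [h]
            · rcases max_choice v d with h' | h' <;> rw [h']
              · exact ih2
              · exact Or.inr ⟨hdvd, h2.2⟩
            · exact Or.inr ⟨hqdvd, h1.2⟩
          · rcases max_choice v (n / d) with h | h <;> rw [h]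
            · exact ih2
            · exact Or.inr ⟨hqdvd, h1.2⟩
          · rcases max_choice v d with h | h <;> rw [h]
            · exact ih2
            · exact Or.inr ⟨hdvd, h2.2⟩
          · exact ih2
        · intro e hedvd he1 hek hej
          rcases (by omega : e ≤ (m : Int) ∨ e = d) with h | h
          · have := ih3 e hedvd he1 hek h; omega
          · subst h
            split_ifs with h1 h2 h2
            · exact le_max_of_le_left (le_max_right v d)
            · exact absurd ⟨he1, hek⟩ h2
            · exact le_max_right v d
            · exact absurd ⟨he1, hek⟩ h2
        · intro e hedvd he1 hek hej
          rcases (by omega : e ≤ (m : Int) ∨ e = d) with h | h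
          · have := ih4 e hedvd he1 hek h; omega
          · subst h
            rw [if_pos (⟨hq1, hek⟩ : 1 ≤ n / d ∧ n / d ≤ k)]
            exact le_max_right _ _
      · have hstep : solveStep n k v d = v := by
          simp only [solveStep, PySem.Int.mod_eq_zero_iff_dvd]
          rw [if_neg hdvd]
        rw [hstep]
        refine ⟨ih1, ih2, ?_, ?_⟩
        · intro e hedvd he1 hek hej
          rcases (by omega : e ≤ (m : Int) ∨ e = d) with h | h
          · exact ih3 e hedvd he1 hek h
          · subst h; exact absurd hedvd hdvd
        · intro e hedvd he1 hek hej
          rcases (by omega : e ≤ (m : Int) ∨ e = d) with h | h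
          · exact ih4 e hedvd he1 hek h
          · subst h; exact absurd hedvd hdvd


set_option maxHeartbeats 1000000 in
theorem solve_main : ∀ (n k : Int), 0 ≤ n → solve n k = solve_alt n k := by
  intro n k hn0
  rcases eq_or_lt_of_le hn0 with h0 | hn
  · rw [← h0]
    have h : ((Nat.sqrt (0:Int).toNat : Nat) : Int) = 0 := by norm_num
    simp only [solve, solve_alt, h]
    rw [PySem.List.pyRange_one_eq_nil (by omega), PySem.List.pyRange_neg_one_eq_nil (by omega)]
    simp [PySem.Int.floordiv]
  · have hn1 : 1 ≤ n := hn
    set r : Int := (Nat.sqrt n.toNat : Int) with hrdef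
    have hr1 : 1 ≤ r := by
      have : 0 < Nat.sqrt n.toNat := Nat.sqrt_pos.2 (by omega)
      omega
    have hrsq2 : n < (r + 1) * (r + 1) := by
      have h := Nat.lt_succ_sqrt n.toNat
      have hcast : ((n.toNat : Int)) = n := Int.toNat_of_nonneg hn0
      have h2 : ((n.toNat : Int)) < ((n.toNat.sqrt.succ * n.toNat.sqrt.succ : Nat) : Int) := by
        exact_mod_cast h
      push_cast [Nat.succ_eq_add_one] at h2
      rw [hcast] at h2
      exact h2
    obtain ⟨hv1, hv2, hv3, hv4⟩ := foldInv n k hn1 (Nat.sqrt n.toNat)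
    set v : Int := (PySem.List.pyRange 1 (r + 1) 1).foldl (solveStep n k) 1 with hvdef
    have vmax : ∀ e : Int, e ∣ n → 1 ≤ e → e ≤ k → e ≤ v := by
      intro e hedvd he1 hek
      by_cases her : e ≤ r
      · exact hv3 e hedvd he1 hek her
      · obtain ⟨hmul, hq1, hqdvd, hqq⟩ := divFacts n e hn1 he1 hedvd
        have hqr : n / e ≤ r := by
          by_contra hh; push_neg at hh; nlinarith
        have h := hv4 (n / e) hqdvd hq1 (by rw [hqq]; exact hek) hqr
        rw [hqq] at h; exact h
    have hfd : PySem.Int.floordiv n v = n / v :=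
      PySem.Int.floordiv_eq_ediv_of_pos (by omega)
    have hp1 : ∀ x : Int, 1 ≤ x →
        ((PySem.Int.mod n x == 0 && decide (PySem.Int.floordiv n x ≤ k)) = true ↔
          (x ∣ n ∧ n / x ≤ k)) := by
      intro x hx
      rw [PySem.Int.floordiv_eq_ediv_of_pos (by omega : (0:Int) < x)]
      simp [PySem.Int.mod_eq_zero_iff_dvd]
    have hp2 : ∀ x : Int,
        ((PySem.Int.mod n x == 0 && decide (x ≤ k)) = true ↔ (x ∣ n ∧ x ≤ k)) := by
      intro x
      simp [PySem.Int.mod_eq_zero_iff_dvd]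
    simp only [solve, solve_alt]
    rw [← hrdef, ← hvdef]
    cases hfind : (PySem.List.pyRange 1 (r + 1) 1).find?
        (fun q => PySem.Int.mod n q == 0 && decide (PySem.Int.floordiv n q ≤ k)) with
    | some q =>
        show PySem.Int.toStr (PySem.Int.floordiv n v) = PySem.Int.toStr q
        obtain ⟨hpq, hq1, hqlt, hmin⟩ :=
          ascFind _ (r + 1) (r + 1).toNat 1 (by omega) q hfind
        obtain ⟨hqdvd, hqk⟩ := (hp1 q hq1).1 hpq
        obtain ⟨hqmul, hnq1, hnqdvd, hnqq⟩ := divFacts n q hn1 hq1 hqdvd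
        have hnqv : n / q ≤ v := vmax (n / q) hnqdvd hnq1 hqk
        rw [hfd]
        rcases hv2 with hveq | ⟨hvdvd, hvk⟩
        · have h1 : n / q = 1 := by omega
          have hnq : n = q := by rw [← hqmul, h1]; ring
          rw [hveq, Int.ediv_one, hnq]
        · obtain ⟨hvmul, hnv1, hnvdvd, hnvv⟩ := divFacts n v hn1 (by omega) hvdvd
          have hpnv := (hp1 (n / v) hnv1).2 ⟨hnvdvd, by rw [hnvv]; exact hvk⟩
          have hq_le : q ≤ n / v := by
            by_contra hlt; push_neg at hlt
            exact absurd hpnv (by simpa using hmin (n / v) hnv1 hlt)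
          have hnv_le : n / v ≤ q := by
            nlinarith [mul_le_mul_of_nonneg_left hnqv (by omega : (0:Int) ≤ q)]
          rw [le_antisymm hnv_le hq_le]
    | none =>
        have hnone : ∀ x : Int, 1 ≤ x → x ≤ r → ¬(x ∣ n ∧ n / x ≤ k) := by
          intro x h1 h2 hx
          have hmem : x ∈ PySem.List.pyRange 1 (r + 1) 1 :=
            PySem.List.mem_pyRange_one.2 ⟨h1, by omega⟩
          exact (List.find?_eq_none.1 hfind x hmem) ((hp1 x h1).2 hx)
        by_cases hk : 1 ≤ k
        · have hvr : v ≤ r := by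
            rcases hv2 with hveq | ⟨hvdvd, hvk⟩
            · omega
            · by_contra hgt; push_neg at hgt
              obtain ⟨hvmul, hnv1, hnvdvd, hnvv⟩ := divFacts n v hn1 (by omega) hvdvd
              have hbr : n / v ≤ r := by
                by_contra hh; push_neg at hh; nlinarith
              exact hnone (n / v) hnv1 hbr ⟨hnvdvd, by rw [hnvv]; exact hvk⟩
          have hvdvd : v ∣ n := by
            rcases hv2 with h | h
            · rw [h]; exact one_dvd n
            · exact h.1
          have hvk : v ≤ k := by
            rcases hv2 with h | h
            · omega
            · exact h.2
          have hp2v := (hp2 v).2 ⟨hvdvd, hvk⟩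
          cases hfind2 : (PySem.List.pyRange r 0 (-1)).find?
              (fun d => PySem.Int.mod n d == 0 && decide (d ≤ k)) with
          | none =>
              exfalso
              have hmem : v ∈ PySem.List.pyRange r 0 (-1) :=
                PySem.List.mem_pyRange_neg_one.2 ⟨by omega, hvr⟩
              exact (List.find?_eq_none.1 hfind2 v hmem) hp2v
          | some d =>
              show PySem.Int.toStr (PySem.Int.floordiv n v) = PySem.Int.toStr (PySem.Int.floordiv n d)
              obtain ⟨hpd, hd0, hdr, hmax⟩ := descFind _ r.toNat r (by omega) d hfind2
              obtain ⟨hddvd, hdk⟩ := (hp2 d).1 hpd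
              have hdv : d ≤ v := vmax d hddvd (by omega) hdk
              have hvd : v ≤ d := by
                by_contra hlt; push_neg at hlt
                exact absurd hp2v (by simpa using hmax v hlt hvr)
              rw [show d = v by omega, hfd]
        · have hveq : v = 1 := by
            rcases hv2 with h | h
            · exact h
            · omega
          have hfind2 : (PySem.List.pyRange r 0 (-1)).find?
              (fun d => PySem.Int.mod n d == 0 && decide (d ≤ k)) = none := by
            apply List.find?_eq_none.2
            intro x hmem
            obtain ⟨hx0, hxr⟩ := PySem.List.mem_pyRange_neg_one.1 hmem
            intro hpx
            obtain ⟨_, hxk⟩ := (hp2 x).1 hpx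
            omega
          rw [hfind2]
          show PySem.Int.toStr (PySem.Int.floordiv n v) = PySem.Int.toStr n
          rw [hfd, hveq, Int.ediv_one]

-- ===== VERDICT (by name: the statement is the Claim_ definition above) =====
theorem solve_spec : Claim_equal_solve := by
  intro n k _ hpre
  unfold Spec_solve
  exact solve_main n k hpre
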